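-- pv_equiv track=rewrite | github.com/reilly-cuauhtemoc-8178/Final-Project | summoner_container.py | comp_champ_stats
-- ===== SOURCE A (Python) =====
-- def comp_champ_stats(champion_array, sort_by, compare=None):
--     """
--     Operate on 2D array of champion statistics, returning based on key.
--
--     Parameters:
--         champion_array : list
--             2D array containing statistics.
--         compare : list
--             List containing ids of highest mastery champions.
--         sort_by : str
--             Key indicating what to return.
--     Returns : list
--
--     """
--     if compare is not None:
--         cmp_array = list()
--         for c_tuple in compare:
--             for d_tuple in champion_array:
--                 if c_tuple[0] == d_tuple[0]:
--                     cmp_array.append(d_tuple)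
--         return sorted(cmp_array, key=lambda x: x[6], reverse=True)
--     count = 5
--     if sort_by == "wins-as":
--         team, rev_value, count = (1, True, 1)
--     if sort_by == "wins-with":
--         team, rev_value = (2, True)
--     if sort_by == "wins-against":
--         team, rev_value = (3, True)
--     if sort_by == "losses-as":
--         team, rev_value = (1, False)
--     if sort_by == "losses-with":
--         team, rev_value = (2, False)
--     if sort_by == "losses-against":
--         team, rev_value = (3, False)
--
--     ret_list = [x for x in champion_array if x[team] >= count]
--     ret_list_2 = sorted(ret_list,
--                         key=lambda x: x[team],
--                         reverse=rev_value)[0:5]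
--
--     return ret_list_2
-- ===== SOURCE B (Python) =====
-- _SORT_PARAMS = {
--     "wins-as": (1, True, 1),
--     "wins-with": (2, True, 5),
--     "wins-against": (3, True, 5),
--     "losses-as": (1, False, 5),
--     "losses-with": (2, False, 5),
--     "losses-against": (3, False, 5),
-- }
--
--
-- def _insert(buf, row, keyidx, reverse):
--     """Stable insert of row into buf, which is kept ordered by row[keyidx]
--     (descending if reverse, else ascending); ties keep insertion order."""
--     k = row[keyidx]
--     i = 0
--     while i < len(buf):
--         b = buf[i][keyidx]
--         if (b >= k) if reverse else (b <= k):
--             i += 1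
--         else:
--             break
--     return buf[:i] + [row] + buf[i:]
--
--
-- def comp_champ_stats(champion_array, sort_by, compare=None):
--     if compare is not None:
--         # online stable insertion: the result is kept sorted (desc by x[6])
--         # while matching rows are discovered; no separate sort pass
--         result = []
--         for c_tuple in compare:
--             for d_tuple in champion_array:
--                 if c_tuple[0] == d_tuple[0]:
--                     result = _insert(result, d_tuple, 6, True)
--         return result
--     team, rev_value, count = _SORT_PARAMS[sort_by]
--     # bounded top-5 selection in one pass: keep at most 5 rows in a sorted
--     # buffer instead of filtering, fully sorting and slicing
--     top = []
--     for x in champion_array: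
--         if x[team] >= count:
--             top = _insert(top, x, team, rev_value)[:5]
--     return top
-- ===== Notes on version B (the rewrite author's own statement) =====
-- stated objective: alternative
-- what changed: Both of A's collect-then-full-sort passes are replaced by online stable insertion into an ordered buffer: the compare branch inserts each matched row into its sorted position as it is found (no separate sort pass), and the sort_by branch keeps a bounded size-5 sorted buffer in one pass over champion_array instead of filtering, fully sorting and slicing; the if-chain becomes a lookup table.
import Mathlib
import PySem

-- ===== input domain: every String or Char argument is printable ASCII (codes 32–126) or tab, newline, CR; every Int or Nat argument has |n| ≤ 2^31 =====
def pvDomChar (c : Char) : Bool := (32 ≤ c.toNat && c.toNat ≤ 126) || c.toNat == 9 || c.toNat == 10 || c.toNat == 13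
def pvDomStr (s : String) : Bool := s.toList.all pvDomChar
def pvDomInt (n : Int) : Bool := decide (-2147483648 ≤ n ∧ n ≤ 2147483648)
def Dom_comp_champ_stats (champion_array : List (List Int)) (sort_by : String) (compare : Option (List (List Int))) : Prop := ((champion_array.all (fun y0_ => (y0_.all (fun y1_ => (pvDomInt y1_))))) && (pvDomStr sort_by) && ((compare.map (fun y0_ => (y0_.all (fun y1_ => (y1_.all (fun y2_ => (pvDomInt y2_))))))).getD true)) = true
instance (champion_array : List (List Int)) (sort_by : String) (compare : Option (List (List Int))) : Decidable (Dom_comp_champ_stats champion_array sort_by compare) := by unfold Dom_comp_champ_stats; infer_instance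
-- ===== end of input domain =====

-- B replaces A's collect-then-sort passes by online stable insertion into an ordered buffer (bounded to 5 rows in the sort_by branch); equivalence of return values proved on Pre_.


-- ===== PORT A =====
def comp_champ_stats (champion_array : List (List Int)) (sort_by : String) (compare : Option (List (List Int))) : List (List Int) :=
  match compare with
  | some cmp =>
    -- nested loops: for c_tuple in compare: for d_tuple in champion_array: if c_tuple[0] == d_tuple[0]: append
    let cmp_array := cmp.foldl (fun acc c =>
      champion_array.foldl (fun acc2 d =>
        if PySem.List.pyGetD c 0 0 = PySem.List.pyGetD d 0 0 then acc2 ++ [d] else acc2) acc) []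
    PySem.List.sorted cmp_array (fun x => PySem.List.pyGetD x 6 0) true
  | none =>
    -- count = 5; the if-chain setting (team, rev_value[, count]); unmatched sort_by raises NameError (excluded by Pre_)
    let st : Option (Int × Bool) × Int := (none, 5)
    let st := if sort_by = "wins-as" then (some ((1 : Int), true), (1 : Int)) else st
    let st := if sort_by = "wins-with" then (some ((2 : Int), true), st.2) else st
    let st := if sort_by = "wins-against" then (some ((3 : Int), true), st.2) else st
    let st := if sort_by = "losses-as" then (some ((1 : Int), false), st.2) else st
    let st := if sort_by = "losses-with" then (some ((2 : Int), false), st.2) else st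
    let st := if sort_by = "losses-against" then (some ((3 : Int), false), st.2) else st
    match st.1 with
    | none => []
    | some (team, rev_value) =>
      let ret_list := champion_array.filter (fun x => decide (st.2 ≤ PySem.List.pyGetD x team 0))
      PySem.List.slice (PySem.List.sorted ret_list (fun x => PySem.List.pyGetD x team 0) rev_value) (some 0) (some 5)

-- ===== PORT B =====
-- _SORT_PARAMS module constant
def compParamsTable : PySem.Dict String (Int × Bool × Int) :=
  PySem.Dict.ofList [("wins-as", ((1 : Int), true, (1 : Int))), ("wins-with", (2, true, 5)),
    ("wins-against", (3, true, 5)), ("losses-as", (1, false, 5)),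
    ("losses-with", (2, false, 5)), ("losses-against", (3, false, 5))]

-- _insert: walk buf while the kept-in-front condition holds, splice row in at the first failure
def insRow (buf : List (List Int)) (row : List Int) (keyidx : Int) (reverse : Bool) : List (List Int) :=
  match buf with
  | [] => [row]
  | b :: rest =>
    if (if reverse then decide (PySem.List.pyGetD row keyidx 0 ≤ PySem.List.pyGetD b keyidx 0)
        else decide (PySem.List.pyGetD b keyidx 0 ≤ PySem.List.pyGetD row keyidx 0))
    then b :: insRow rest row keyidx reverse
    else row :: b :: rest

def comp_champ_stats_alt (champion_array : List (List Int)) (sort_by : String) (compare : Option (List (List Int))) : List (List Int) :=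
  match compare with
  | some cmp =>
    -- matched rows are inserted into their sorted position (desc by x[6]) as they are found
    cmp.foldl (fun res c =>
      champion_array.foldl (fun r d =>
        if PySem.List.pyGetD c 0 0 = PySem.List.pyGetD d 0 0 then insRow r d 6 true else r) res) []
  | none =>
    match compParamsTable.get? sort_by with
    | none => []   -- Python raises KeyError; excluded by Pre_
    | some (team, rev_value, count) =>
      -- one pass with a bounded (≤ 5) sorted buffer: top = _insert(top, x, team, rev_value)[:5]
      champion_array.foldl (fun top x =>
        if decide (count ≤ PySem.List.pyGetD x team 0)
        then PySem.List.slice (insRow top x team rev_value) none (some 5)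
        else top) []

-- ===== PRECONDITION & SPEC =====
-- Pre_ excludes exactly the inputs on which A raises: (compare branch) an empty row of compare or
-- champion_array reached by the nested scan (IndexError on c[0]/d[0]) or a matched row shorter than 7
-- (IndexError on the sort key x[6]); (no-compare branch) sort_by outside the six keys (NameError) and
-- rows too short for x[team] (IndexError).
def Pre_comp_champ_stats (champion_array : List (List Int)) (sort_by : String) (compare : Option (List (List Int))) : Prop :=
  match compare with
  | some cmp =>
      (champion_array = [] ∨ cmp = [] ∨ ((∀ c ∈ cmp, c ≠ []) ∧ (∀ d ∈ champion_array, d ≠ []))) ∧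
      (∀ d ∈ champion_array, (∃ c ∈ cmp, d.head? = c.head?) → 7 ≤ d.length)
  | none =>
      (sort_by = "wins-as" ∨ sort_by = "wins-with" ∨ sort_by = "wins-against" ∨
       sort_by = "losses-as" ∨ sort_by = "losses-with" ∨ sort_by = "losses-against") ∧
      (∀ x ∈ champion_array,
        (if sort_by = "wins-as" ∨ sort_by = "losses-as" then 2
         else if sort_by = "wins-with" ∨ sort_by = "losses-with" then 3 else 4) ≤ x.length)

instance (champion_array : List (List Int)) (sort_by : String) (compare : Option (List (List Int))) : Decidable (Pre_comp_champ_stats champion_array sort_by compare) := by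
  unfold Pre_comp_champ_stats; cases compare <;> infer_instance

def pvWitness_comp_champ_stats : List (List Int) × String × Option (List (List Int)) :=
  ([[10, 6, 1, 0, 2, 0, 0]], "wins-as", none)

def Spec_comp_champ_stats (champion_array : List (List Int)) (sort_by : String) (compare : Option (List (List Int))) (out : List (List Int)) : Prop := out = comp_champ_stats_alt champion_array sort_by compare
instance (champion_array : List (List Int)) (sort_by : String) (compare : Option (List (List Int))) (out : List (List Int)) : Decidable (Spec_comp_champ_stats champion_array sort_by compare out) := by unfold Spec_comp_champ_stats; infer_instance

-- ===== CLAIM (what is proved, stated in full; the proofs are below) =====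
def Claim_equal_comp_champ_stats : Prop := ∀ (champion_array : List (List Int)) (sort_by : String) (compare : Option (List (List Int))), Dom_comp_champ_stats champion_array sort_by compare → Pre_comp_champ_stats champion_array sort_by compare → Spec_comp_champ_stats champion_array sort_by compare (comp_champ_stats champion_array sort_by compare)

-- ===== LEMMAS AND PROOFS =====

-- B's hand-written stable insert is PySem's insertBy with the corresponding strict 'before' test.
lemma insRow_eq_insertBy (buf : List (List Int)) (row : List Int) (ki : Int) (rev : Bool) :
    insRow buf row ki rev
      = PySem.List.insertBy
          (if rev then (fun a b => decide (PySem.List.pyGetD b ki 0 < PySem.List.pyGetD a ki 0))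
           else (fun a b => decide (PySem.List.pyGetD a ki 0 < PySem.List.pyGetD b ki 0)))
          row buf := by
  induction buf with
  | nil => cases rev <;> rfl
  | cons b rest ih =>
    cases rev <;> simp only [insRow, PySem.List.insertBy, if_true, ih] <;>
      by_cases h : PySem.List.pyGetD row ki 0 ≤ PySem.List.pyGetD b ki 0 <;>
      by_cases h2 : PySem.List.pyGetD b ki 0 ≤ PySem.List.pyGetD row ki 0 <;>
      simp_all

-- the sorted order is exactly a left fold of insRow
lemma sorted_eq_foldl_insRow (xs : List (List Int)) (ki : Int) (rev : Bool) :
    PySem.List.sorted xs (fun x => PySem.List.pyGetD x ki 0) rev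
      = xs.foldl (fun acc x => insRow acc x ki rev) [] := by
  cases rev
  · rw [PySem.List.sorted_eq_foldl_insertBy]
    simp [insRow_eq_insertBy]
  · rw [PySem.List.sorted_rev_eq_foldl_insertBy]
    simp [insRow_eq_insertBy]

-- truncating before or after an insertBy makes no difference to the first n elements
lemma take_cons_take {α : Type} (n : Nat) (y : α) (ys : List α) :
    (y :: ys.take n).take n = (y :: ys).take n := by
  cases n with
  | zero => simp
  | succ m => simp [List.take_take]

lemma take_insertBy {α : Type} (bef : α → α → Bool) (x : α) (n : Nat) (l : List α) :
    (PySem.List.insertBy bef x (l.take n)).take n = (PySem.List.insertBy bef x l).take n := by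
  induction l generalizing n with
  | nil => simp
  | cons y ys ih =>
    cases n with
    | zero => simp [PySem.List.insertBy]
    | succ m =>
      simp only [List.take_succ_cons, PySem.List.insertBy]
      by_cases h : bef x y
      · simp only [h, if_true, List.take_succ_cons]
        exact congrArg (x :: ·) (take_cons_take m y ys)
      · simp [h, ih]

lemma foldl_take_insertBy {α : Type} (bef : α → α → Bool) (n : Nat) (xs : List α) :
    ∀ acc : List α,
      xs.foldl (fun b x => (PySem.List.insertBy bef x b).take n) (acc.take n)
        = (xs.foldl (fun b x => PySem.List.insertBy bef x b) acc).take n := by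
  induction xs with
  | nil => intro acc; simp
  | cons x xs ih =>
    intro acc
    simp only [List.foldl_cons, take_insertBy]
    exact ih (PySem.List.insertBy bef x acc)

-- fusing a left fold through a list built by appends
lemma foldl_ins_flat {α β : Type} (g : β → List α) (ins : List α → α → List α)
    (cmp : List β) : ∀ acc : List α,
    cmp.foldl (fun buf c => (g c).foldl ins buf) (acc.foldl ins [])
      = (cmp.foldl (fun a c => a ++ g c) acc).foldl ins [] := by
  induction cmp with
  | nil => intro acc; simp
  | cons c cs ih =>
    intro acc
    simp only [List.foldl_cons]
    have : (g c).foldl ins (acc.foldl ins []) = ((acc ++ g c).foldl ins []) := by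
      rw [List.foldl_append]
    rw [this, ih (acc ++ g c)]

-- the compare branch: A's collect-then-sort equals B's fused insertion scan
lemma compare_branch_eq (champion_array cmp : List (List Int)) :
    PySem.List.sorted
      (cmp.foldl (fun acc c =>
        champion_array.foldl (fun acc2 d =>
          if PySem.List.pyGetD c 0 0 = PySem.List.pyGetD d 0 0 then acc2 ++ [d] else acc2) acc) [])
      (fun x => PySem.List.pyGetD x 6 0) true
    = cmp.foldl (fun res c =>
        champion_array.foldl (fun r d =>
          if PySem.List.pyGetD c 0 0 = PySem.List.pyGetD d 0 0 then insRow r d 6 true else r) res) [] := by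
  rw [sorted_eq_foldl_insRow]
  have hA : ∀ acc, cmp.foldl (fun acc c =>
        champion_array.foldl (fun acc2 d =>
          if PySem.List.pyGetD c 0 0 = PySem.List.pyGetD d 0 0 then acc2 ++ [d] else acc2) acc) acc
      = cmp.foldl (fun acc c =>
          acc ++ champion_array.filter (fun d => decide (PySem.List.pyGetD c 0 0 = PySem.List.pyGetD d 0 0))) acc := by
    intro acc
    exact PySem.List.foldl_congr_mem _ _ _ _ (fun a c _ => PySem.List.foldl_append_ite_eq_filter _ _ _)
  have hB : ∀ res, cmp.foldl (fun res c =>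
        champion_array.foldl (fun r d =>
          if PySem.List.pyGetD c 0 0 = PySem.List.pyGetD d 0 0 then insRow r d 6 true else r) res) res
      = cmp.foldl (fun res c =>
          (champion_array.filter (fun d => decide (PySem.List.pyGetD c 0 0 = PySem.List.pyGetD d 0 0))).foldl
            (fun r d => insRow r d 6 true) res) res := by
    intro res
    exact PySem.List.foldl_congr_mem _ _ _ _ (fun a c _ => PySem.List.foldl_ite_eq_foldl_filter _ _ _ _)
  rw [hA, hB]
  have := foldl_ins_flat
    (g := fun c => champion_array.filter (fun d => decide (PySem.List.pyGetD c 0 0 = PySem.List.pyGetD d 0 0)))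
    (ins := fun r d => insRow r d 6 true) cmp []
  simpa using this.symm

-- the sort_by branch for fixed parameters: filter-sort-slice equals the bounded insertion pass
lemma select_branch_eq (champion_array : List (List Int)) (team : Int) (rev : Bool) (count : Int) :
    PySem.List.slice
      (PySem.List.sorted
        (champion_array.filter (fun x => decide (count ≤ PySem.List.pyGetD x team 0)))
        (fun x => PySem.List.pyGetD x team 0) rev) (some 0) (some 5)
    = champion_array.foldl (fun top x =>
        if decide (count ≤ PySem.List.pyGetD x team 0)
        then PySem.List.slice (insRow top x team rev) none (some 5)
        else top) [] := by
  have h5 : ∀ l : List (List Int), PySem.List.slice l none (some 5) = l.take 5 := by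
    intro l
    have := PySem.List.slice_to_natCast (xs := l) (b := 5)
    simpa using this
  have h05 : ∀ l : List (List Int), PySem.List.slice l (some 0) (some 5) = l.take 5 := by
    intro l
    rw [PySem.List.slice_zero_start]; exact h5 l
  rw [h05, sorted_eq_foldl_insRow]
  rw [PySem.List.foldl_if_eq_foldl_filter]
  have hR : (champion_array.filter (fun x => decide (count ≤ PySem.List.pyGetD x team 0))).foldl
        (fun top x => PySem.List.slice (insRow top x team rev) none (some 5)) []
      = (champion_array.filter (fun x => decide (count ≤ PySem.List.pyGetD x team 0))).foldl
          (fun top x =>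
            (PySem.List.insertBy
              (if rev then (fun a b => decide (PySem.List.pyGetD b team 0 < PySem.List.pyGetD a team 0))
               else (fun a b => decide (PySem.List.pyGetD a team 0 < PySem.List.pyGetD b team 0))) x top).take 5) [] := by
    refine PySem.List.foldl_congr_mem _ _ _ _ (fun top x _ => ?_)
    rw [h5, insRow_eq_insertBy]
  rw [hR]
  have hL : (champion_array.filter (fun x => decide (count ≤ PySem.List.pyGetD x team 0))).foldl
        (fun acc x => insRow acc x team rev) []
      = (champion_array.filter (fun x => decide (count ≤ PySem.List.pyGetD x team 0))).foldl
          (fun acc x => PySem.List.insertBy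
              (if rev then (fun a b => decide (PySem.List.pyGetD b team 0 < PySem.List.pyGetD a team 0))
               else (fun a b => decide (PySem.List.pyGetD a team 0 < PySem.List.pyGetD b team 0))) x acc) [] := by
    refine PySem.List.foldl_congr_mem _ _ _ _ (fun acc x _ => ?_)
    rw [insRow_eq_insertBy]
  rw [hL]
  have := foldl_take_insertBy
    (bef := (if rev then (fun a b => decide (PySem.List.pyGetD b team 0 < PySem.List.pyGetD a team 0))
             else (fun a b => decide (PySem.List.pyGetD a team 0 < PySem.List.pyGetD b team 0))))
    (n := 5) (xs := champion_array.filter (fun x => decide (count ≤ PySem.List.pyGetD x team 0))) []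
  simpa using this.symm

-- ===== VERDICT (by name: the statement is the Claim_ definition above) =====
theorem comp_champ_stats_spec : Claim_equal_comp_champ_stats := by
  intro champion_array sort_by compare _hdom hpre
  unfold Spec_comp_champ_stats
  match compare with
  | some cmp =>
      simp only [comp_champ_stats, comp_champ_stats_alt]
      rw [compare_branch_eq]
  | none =>
      rcases hpre with ⟨hsb, -⟩
      rcases hsb with h | h | h | h | h | h <;> subst h <;>
        simp only [comp_champ_stats, comp_champ_stats_alt,
          show compParamsTable.get? "wins-as" = some (1, true, 1) from rfl,
          show compParamsTable.get? "wins-with" = some (2, true, 5) from rfl,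
          show compParamsTable.get? "wins-against" = some (3, true, 5) from rfl,
          show compParamsTable.get? "losses-as" = some (1, false, 5) from rfl,
          show compParamsTable.get? "losses-with" = some (2, false, 5) from rfl,
          show compParamsTable.get? "losses-against" = some (3, false, 5) from rfl] <;>
        exact select_branch_eq ..
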